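-- pv_equiv track=rewrite | github.com/Genome-Bioinformatics-RadboudUMC/DeNovoCNN | denovonet/infer.py | remove_matching_string
-- ===== SOURCE A (Python) =====
-- from difflib import SequenceMatcher
--
-- def remove_matching_string(start, ref, var):
--     """
--     Remove common prefix in reference and alterative
--     alleles updating start position of the variant
--
--     Parameters:
--     start (int): variant start position
--     ref (str): reference allele
--     var (str): alternative allele
--
--     Returns:
--     int: updated variant start position
--     str: reference allele without common prefix
--     str: alternative allele without common prefix
--     """
--     insertion = bool(len(ref) > len(var))
--
--     match = SequenceMatcher(None, ref, var,
--                             autojunk=False).find_longest_match(0, len(ref), 0, len(var))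
--
--
--     new_ref = ref.replace(ref[match.a: match.a + match.size], '', 1)
--     new_var = var.replace(var[match.b:  match.b + match.size], '', 1)
--
--     if insertion:
--         start += match.size
--
--     if match.size == 0:
--         return start, new_ref, new_var
--     else:
--         return remove_matching_string(start, new_ref, new_var)
-- ===== SOURCE B (Python) =====
-- def _longest_match(a, b):
--     """Longest common substring of a and b via a rolling-row DP over arrays.
--
--     Returns (size, i, j) with a[i:i+size] == b[j:j+size]; among all maximal
--     matches it picks the one starting earliest in a, then earliest in b
--     (the same answer difflib's junk-free SequenceMatcher gives).
--     """
--     n, m = len(a), len(b)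
--     best_size, best_i, best_j = 0, 0, 0
--     prev = [0] * (m + 1)
--     for i in range(n):
--         cur = [0] * (m + 1)
--         ai = a[i]
--         for j in range(m):
--             if ai == b[j]:
--                 k = prev[j] + 1
--                 cur[j + 1] = k
--                 if k > best_size:
--                     best_size, best_i, best_j = k, i - k + 1, j - k + 1
--         prev = cur
--     return best_size, best_i, best_j
--
--
-- def remove_matching_string(start, ref, var):
--     """Iteratively strip the longest common substring from ref/var,
--     shifting start by the removed length while ref is the longer allele."""
--     while True:
--         size, a, b = _longest_match(ref, var)
--         if size == 0:
--             return start, ref, var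
--         if len(ref) > len(var):
--             start += size
--         ref = ref.replace(ref[a:a + size], '', 1)
--         var = var.replace(var[b:b + size], '', 1)
-- ===== Notes on version B (the rewrite author's own statement) =====
-- stated objective: alternative
-- what changed: Replaces A's recursion around difflib's hash-indexed matcher (b2j index lists + j2len dicts + extension loops) with an iterative while-loop around an explicit rolling-row array DP for the longest common substring (same earliest-in-ref, then earliest-in-var tie-break).
import Mathlib
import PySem

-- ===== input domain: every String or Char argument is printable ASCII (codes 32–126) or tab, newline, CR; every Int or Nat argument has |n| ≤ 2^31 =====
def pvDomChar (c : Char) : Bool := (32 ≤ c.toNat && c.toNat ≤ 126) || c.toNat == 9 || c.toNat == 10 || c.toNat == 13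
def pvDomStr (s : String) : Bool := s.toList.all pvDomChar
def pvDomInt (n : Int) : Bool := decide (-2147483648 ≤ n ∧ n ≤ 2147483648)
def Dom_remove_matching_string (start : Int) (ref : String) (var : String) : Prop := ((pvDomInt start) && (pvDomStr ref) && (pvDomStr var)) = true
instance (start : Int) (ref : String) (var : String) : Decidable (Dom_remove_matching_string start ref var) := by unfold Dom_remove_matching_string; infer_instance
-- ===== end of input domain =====

-- B replaces A's recursion + difflib's hash-indexed (b2j/j2len dict) matcher by an iterative
-- loop around an explicit array-based longest-common-substring DP (objective: alternative).

-- ===== PORT A =====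

-- s.replace(sub, '', 1): PySem.Chars.replace has no count argument, so this is a hand port,
-- exact for new = '' and count = 1: remove the FIRST occurrence of sub (s unchanged if sub
-- is empty — ''.replace semantics insert '' — or absent). Used by both ports (both Pythons
-- call .replace(sub, '', 1) verbatim).
def pvSubRemove (s sub : List Char) : List Char :=
  if sub = [] then s
  else
    let i := PySem.Chars.find s sub
    if i = -1 then s else s.take i.toNat ++ s.drop (i.toNat + sub.length)

-- difflib SequenceMatcher.__chain_b with no junk and autojunk=False:
-- for i, elt in enumerate(b): b2j.setdefault(elt, []).append(i)
def pvChainB (b : List Char) : PySem.Dict Char (List Int) :=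
  (PySem.List.enumerate b 0).foldl (fun d p => d.modify p.2 [] (· ++ [p.1])) PySem.Dict.empty

-- inner 'for j in b2j.get(a[i], nothing)' loop of find_longest_match, with the
-- 'if j < blo: continue' (blo = 0) and 'if j >= bhi: break' (bhi = len(b)) tests;
-- state = ((besti, bestj, bestsize), newj2len)
def pvInnerA (b : List Char) (i : Int) (j2len : PySem.Dict Int Int) :
    List Int → (Int × Int × Int) × PySem.Dict Int Int → (Int × Int × Int) × PySem.Dict Int Int
  | [], st => st
  | j :: js, st =>
      if j < 0 then pvInnerA b i j2len js st
      else if (b.length : Int) ≤ j then st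
      else
        let k := j2len.getD (j - 1) 0 + 1
        let newj2len := st.2.insert j k
        let best := if st.1.2.2 < k then (i - k + 1, j - k + 1, k) else st.1
        pvInnerA b i j2len js (best, newj2len)

-- one iteration of the outer 'for i in range(alo, ahi)' loop
def pvRowA (a b : List Char) (b2j : PySem.Dict Char (List Int))
    (st : (Int × Int × Int) × PySem.Dict Int Int) (i : Int) :
    (Int × Int × Int) × PySem.Dict Int Int :=
  let js := b2j.getD (PySem.List.pyGetD a i ' ') []
  pvInnerA b i st.2 js (st.1, PySem.Dict.empty)

-- the four 'extend the best' while-loops (fuel-bounded recursion; the fuel passed in pvFlmA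
-- exceeds any possible number of iterations, since bestsize cannot grow beyond len(a)+len(b));
-- isbjunk is membership in bjunk = set() (empty: junk=None), kept literally as ([]).contains
def pvExt1 (a b : List Char) : Nat → Int × Int × Int → Int × Int × Int
  | 0, st => st
  | fuel + 1, (besti, bestj, bestsize) =>
      if 0 < besti ∧ 0 < bestj ∧
         ¬(([] : List Char).contains (PySem.List.pyGetD b (bestj - 1) ' ') = true) ∧
         PySem.List.pyGetD a (besti - 1) ' ' = PySem.List.pyGetD b (bestj - 1) ' '
      then pvExt1 a b fuel (besti - 1, bestj - 1, bestsize + 1)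
      else (besti, bestj, bestsize)

def pvExt2 (a b : List Char) : Nat → Int × Int × Int → Int × Int × Int
  | 0, st => st
  | fuel + 1, (besti, bestj, bestsize) =>
      if besti + bestsize < (a.length : Int) ∧ bestj + bestsize < (b.length : Int) ∧
         ¬(([] : List Char).contains (PySem.List.pyGetD b (bestj + bestsize) ' ') = true) ∧
         PySem.List.pyGetD a (besti + bestsize) ' ' = PySem.List.pyGetD b (bestj + bestsize) ' '
      then pvExt2 a b fuel (besti, bestj, bestsize + 1)
      else (besti, bestj, bestsize)

def pvExt3 (a b : List Char) : Nat → Int × Int × Int → Int × Int × Int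
  | 0, st => st
  | fuel + 1, (besti, bestj, bestsize) =>
      if 0 < besti ∧ 0 < bestj ∧
         (([] : List Char).contains (PySem.List.pyGetD b (bestj - 1) ' ') = true) ∧
         PySem.List.pyGetD a (besti - 1) ' ' = PySem.List.pyGetD b (bestj - 1) ' '
      then pvExt3 a b fuel (besti - 1, bestj - 1, bestsize + 1)
      else (besti, bestj, bestsize)

def pvExt4 (a b : List Char) : Nat → Int × Int × Int → Int × Int × Int
  | 0, st => st
  | fuel + 1, (besti, bestj, bestsize) =>
      if besti + bestsize < (a.length : Int) ∧ bestj + bestsize < (b.length : Int) ∧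
         (([] : List Char).contains (PySem.List.pyGetD b (bestj + bestsize) ' ') = true) ∧
         PySem.List.pyGetD a (besti + bestsize) ' ' = PySem.List.pyGetD b (bestj + bestsize) ' '
      then pvExt4 a b fuel (besti, bestj, bestsize + 1)
      else (besti, bestj, bestsize)

-- SequenceMatcher(None, a, b, autojunk=False).find_longest_match(0, len(a), 0, len(b))
def pvFlmA (a b : List Char) : Int × Int × Int :=
  let b2j := pvChainB b
  let st := (PySem.List.pyRange 0 (a.length : Int) 1).foldl (pvRowA a b b2j)
              ((0, 0, 0), PySem.Dict.empty)
  let best := pvExt1 a b (a.length + b.length + 1) st.1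
  let best := pvExt2 a b (a.length + b.length + 1) best
  let best := pvExt3 a b (a.length + b.length + 1) best
  pvExt4 a b (a.length + b.length + 1) best

-- A's recursion; the fuel len(ref)+1 set by the wrapper is never exhausted: every recursive
-- call removes a nonempty substring from ref, so the depth is at most len(ref)+1
def pvRmsAgo : Nat → Int → List Char → List Char → Int × List Char × List Char
  | 0, start, ref, var => (start, ref, var)
  | fuel + 1, start, ref, var =>
      let insertion := decide (var.length < ref.length)
      let mtch := pvFlmA ref var
      let ma := mtch.1
      let mb := mtch.2.1
      let msize := mtch.2.2
      let new_ref := pvSubRemove ref (PySem.List.slice ref (some ma) (some (ma + msize)))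
      let new_var := pvSubRemove var (PySem.List.slice var (some mb) (some (mb + msize)))
      let start' := if insertion then start + msize else start
      if msize = 0 then (start', new_ref, new_var)
      else pvRmsAgo fuel start' new_ref new_var

def remove_matching_string (start : Int) (ref : String) (var : String) : Int × String × String :=
  let r := pvRmsAgo (ref.toList.length + 1) start ref.toList var.toList
  (r.1, String.ofList r.2.1, String.ofList r.2.2)

-- ===== PORT B =====

-- Source B's _longest_match: rolling-row array DP; returns (size, i, j)
def pvFlmB (a b : List Char) : Int × Int × Int :=
  let m := b.length
  let step := fun (st : (Nat × Int × Int) × List Nat) (i : Nat) =>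
    let prev := st.2
    let ai := a.getD i ' '
    (List.range m).foldl
      (fun (st2 : (Nat × Int × Int) × List Nat) (j : Nat) =>
        if ai = b.getD j ' ' then
          let k := prev.getD j 0 + 1
          let cur := st2.2.set (j + 1) k
          let best := if st2.1.1 < k then (k, (i : Int) - k + 1, (j : Int) - k + 1) else st2.1
          (best, cur)
        else st2)
      (st.1, List.replicate (m + 1) 0)
  let r := (List.range a.length).foldl step ((0, 0, 0), List.replicate (m + 1) 0)
  ((r.1.1 : Int), r.1.2.1, r.1.2.2)

-- Source B's while-True loop (fuel-bounded; fuel len(ref)+1 from the wrapper is never exhausted,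
-- as every continuing iteration removes a nonempty substring from ref)
def pvRmsBgo : Nat → Int → List Char → List Char → Int × List Char × List Char
  | 0, start, ref, var => (start, ref, var)
  | fuel + 1, start, ref, var =>
      let mtch := pvFlmB ref var
      let msize := mtch.1
      let ma := mtch.2.1
      let mb := mtch.2.2
      if msize = 0 then (start, ref, var)
      else
        let start' := if var.length < ref.length then start + msize else start
        let ref' := pvSubRemove ref (PySem.List.slice ref (some ma) (some (ma + msize)))
        let var' := pvSubRemove var (PySem.List.slice var (some mb) (some (mb + msize)))
        pvRmsBgo fuel start' ref' var'

def remove_matching_string_alt (start : Int) (ref : String) (var : String) : Int × String × String :=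
  let r := pvRmsBgo (ref.toList.length + 1) start ref.toList var.toList
  (r.1, String.ofList r.2.1, String.ofList r.2.2)

-- ===== PRECONDITION & SPEC =====
def Spec_remove_matching_string (start : Int) (ref : String) (var : String) (out : Int × String × String) : Prop := out = remove_matching_string_alt start ref var
instance (start : Int) (ref : String) (var : String) (out : Int × String × String) : Decidable (Spec_remove_matching_string start ref var out) := by unfold Spec_remove_matching_string; infer_instance

-- ===== CLAIM (what is proved, stated in full; the proofs are below) =====
def Claim_equal_remove_matching_string : Prop := ∀ (start : Int) (ref : String) (var : String), Dom_remove_matching_string start ref var → Spec_remove_matching_string start ref var (remove_matching_string start ref var)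

-- ===== LEMMAS AND PROOFS =====

-- length of the longest common suffix of a[0..i] and b[0..j] (out-of-range reads default
-- to ' ' and are only ever used in range)
def pvL (a b : List Char) : Nat → Nat → Nat
  | 0, j => if a.getD 0 ' ' = b.getD j ' ' then 1 else 0
  | i + 1, 0 => if a.getD (i + 1) ' ' = b.getD 0 ' ' then 1 else 0
  | i + 1, j + 1 => if a.getD (i + 1) ' ' = b.getD (j + 1) ' ' then pvL a b i j + 1 else 0

-- the per-cell best update both inner loops implement, abstracted through pvL
def pvBUpd (a b : List Char) (r : Nat) (best : Nat × Int × Int) (j : Nat) : Nat × Int × Int :=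
  let k := pvL a b r j
  if best.1 < k then (k, (r : Int) - k + 1, (j : Int) - k + 1) else best

-- best after scanning all rows < r
def pvBest (a b : List Char) (r : Nat) : Nat × Int × Int :=
  (List.range r).foldl (fun best i => (List.range b.length).foldl (pvBUpd a b i) best) (0, 0, 0)

-- the properties of the best triple after scanning rows < r and, in row r, columns < c
def pvBestOK (a b : List Char) (r c : Nat) (best : Nat × Int × Int) : Prop :=
  (∀ i' j', j' < b.length → (i' < r ∨ (i' = r ∧ j' < c)) → pvL a b i' j' ≤ best.1) ∧
  (best.1 = 0 → best = (0, 0, 0)) ∧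
  (0 < best.1 → ∃ ie je, je < b.length ∧ (ie < r ∨ (ie = r ∧ je < c)) ∧
    pvL a b ie je = best.1 ∧ best.2.1 = (ie : Int) - best.1 + 1 ∧ best.2.2 = (je : Int) - best.1 + 1)

theorem pvL_le_left (a b : List Char) (i j : Nat) : pvL a b i j ≤ i + 1 := by
  induction i generalizing j with
  | zero => cases j <;> simp only [pvL] <;> split <;> omega
  | succ i ih =>
    cases j with
    | zero => simp only [pvL]; split <;> omega
    | succ j => simp only [pvL]; split
                · have := ih j; omega
                · omega

theorem pvL_pos_head (a b : List Char) (i j : Nat) (h : 0 < pvL a b i j) :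
    a.getD i ' ' = b.getD j ' ' := by
  by_contra hne
  rcases i with _ | i <;> rcases j with _ | j <;> (simp only [pvL] at h; rw [if_neg hne] at h; omega)

theorem pvL_zero_of_ne (a b : List Char) (i j : Nat) (h : a.getD i ' ' ≠ b.getD j ' ') :
    pvL a b i j = 0 := by
  rcases i with _ | i <;> rcases j with _ | j <;> (simp only [pvL]; rw [if_neg h])

theorem pvL_succ_eq (a b : List Char) (i j : Nat) (h : a.getD (i+1) ' ' = b.getD (j+1) ' ') :
    pvL a b (i+1) (j+1) = pvL a b i j + 1 := by
  simp only [pvL, h, if_pos]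

theorem pvL_match (a b : List Char) (r j : Nat) (h : a.getD r ' ' = b.getD j ' ') :
    pvL a b r j = (if 1 ≤ r ∧ 1 ≤ j then pvL a b (r-1) (j-1) else 0) + 1 := by
  rcases r with _ | r <;> rcases j with _ | j <;>
    simp only [pvL, h, if_pos] <;> simp

theorem pvL_block (a b : List Char) (i j s : Nat) (hs : pvL a b i j = s)
    (hi : s ≤ i) (hj : s ≤ j) : a.getD (i - s) ' ' ≠ b.getD (j - s) ' ' := by
  induction s generalizing i j with
  | zero =>
    simp only [Nat.sub_zero]
    intro hEq
    have := pvL_match a b i j hEq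
    omega
  | succ s ih =>
    have hpos : 0 < pvL a b i j := by omega
    have hhead := pvL_pos_head a b i j hpos
    rcases i with _ | i; · omega
    rcases j with _ | j; · omega
    have hstep := pvL_succ_eq a b i j hhead
    have hprev : pvL a b i j = s := by omega
    have := ih i j hprev (by omega) (by omega)
    simpa [Nat.succ_sub_succ] using this

theorem pvBestOK_step (a b : List Char) (r c : Nat) (best : Nat × Int × Int)
    (hc : c < b.length) (h : pvBestOK a b r c best) :
    pvBestOK a b r (c+1) (pvBUpd a b r best c) := by
  obtain ⟨hmax, hzero, hpos⟩ := h
  unfold pvBUpd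
  by_cases hlt : best.1 < pvL a b r c
  · simp only [if_pos hlt]
    refine ⟨?_, ?_, ?_⟩
    · intro i' j' hj' hcase
      rcases hcase with hlt' | ⟨rfl, hj'c⟩
      · exact le_of_lt (lt_of_le_of_lt (hmax i' j' hj' (Or.inl hlt')) hlt)
      · rcases Nat.lt_succ_iff_lt_or_eq.mp hj'c with hj'c | rfl
        · exact le_of_lt (lt_of_le_of_lt (hmax i' j' hj' (Or.inr ⟨rfl, hj'c⟩)) hlt)
        · exact le_refl _
    · intro h0; omega
    · intro _; exact ⟨r, c, hc, Or.inr ⟨rfl, Nat.lt_succ_self c⟩, rfl, rfl, rfl⟩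
  · simp only [if_neg hlt]
    refine ⟨?_, hzero, ?_⟩
    · intro i' j' hj' hcase
      rcases hcase with hlt' | ⟨rfl, hj'c⟩
      · exact hmax i' j' hj' (Or.inl hlt')
      · rcases Nat.lt_succ_iff_lt_or_eq.mp hj'c with hj'c | rfl
        · exact hmax i' j' hj' (Or.inr ⟨rfl, hj'c⟩)
        · omega
    · intro hp
      obtain ⟨ie, je, h1, h2, h3⟩ := hpos hp
      exact ⟨ie, je, h1, by tauto, h3⟩

theorem pvBestOK_row (a b : List Char) (r : Nat) (best : Nat × Int × Int)
    (h : pvBestOK a b r 0 best) :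
    pvBestOK a b r b.length ((List.range b.length).foldl (pvBUpd a b r) best) := by
  suffices H : ∀ c, c ≤ b.length → pvBestOK a b r c ((List.range c).foldl (pvBUpd a b r) best) from
    H b.length (le_refl _)
  intro c hc
  induction c with
  | zero => simpa using h
  | succ c ih =>
    rw [List.range_succ, List.foldl_append]
    exact pvBestOK_step a b r c _ (by omega) (ih (by omega))

theorem pvBestOK_wrap (a b : List Char) (r : Nat) (best : Nat × Int × Int)
    (h : pvBestOK a b r b.length best) : pvBestOK a b (r+1) 0 best := by
  obtain ⟨hmax, hzero, hpos⟩ := h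
  refine ⟨?_, hzero, ?_⟩
  · intro i' j' hj' hcase
    apply hmax i' j' hj'
    omega
  · intro hp
    obtain ⟨ie, je, h1, h2, h3⟩ := hpos hp
    exact ⟨ie, je, h1, by omega, h3⟩

theorem pvBestOK_all (a b : List Char) (r : Nat) : pvBestOK a b r 0 (pvBest a b r) := by
  induction r with
  | zero =>
    refine ⟨?_, fun _ => rfl, ?_⟩
    · intro i' j' _ hcase; omega
    · intro hp; simp [pvBest] at hp
  | succ r ih =>
    unfold pvBest at ih ⊢
    rw [List.range_succ, List.foldl_append]
    exact pvBestOK_wrap a b r _ (pvBestOK_row a b r _ ih)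

theorem pvBestOK_final (a b : List Char) : pvBestOK a b a.length 0 (pvBest a b a.length) :=
  pvBestOK_all a b a.length

-- reordering casts from the abstract best triple to each port's tuple order
def pvCastA (best : Nat × Int × Int) : Int × Int × Int := (best.2.1, best.2.2, (best.1 : Int))
def pvCastB (best : Nat × Int × Int) : Int × Int × Int := ((best.1 : Int), best.2.1, best.2.2)

-- B's previous DP row, as read in row r
def pvRowOK (a b : List Char) (r : Nat) (prev : List Nat) : Prop :=
  prev.length = b.length + 1 ∧
  ∀ j : Nat, prev.getD j 0 = if 1 ≤ j ∧ j ≤ b.length ∧ 1 ≤ r then pvL a b (r-1) (j-1) else 0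

theorem pvReadB (a b : List Char) (r j : Nat) (prev : List Nat) (hj : j < b.length)
    (hOK : pvRowOK a b r prev) (hmatch : a.getD r ' ' = b.getD j ' ') :
    prev.getD j 0 + 1 = pvL a b r j := by
  rw [pvL_match a b r j hmatch, hOK.2 j]
  split_ifs with h1 h2 <;> first | rfl | omega

-- B's current DP row after the columns in proc have been scanned
def pvCurOK (a b : List Char) (r : Nat) (proc : List Nat) (cur : List Nat) : Prop :=
  cur.length = b.length + 1 ∧
  ∀ j : Nat, cur.getD j 0 = if 1 ≤ j ∧ (j-1) ∈ proc then pvL a b r (j-1) else 0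

-- the inner-loop body of pvFlmB, named for the proofs (definitionally the lambda in pvFlmB)
def pvStepBRow (a b : List Char) (r : Nat) (prev : List Nat)
    (st2 : (Nat × Int × Int) × List Nat) (j : Nat) : (Nat × Int × Int) × List Nat :=
  if a.getD r ' ' = b.getD j ' ' then
    let k := prev.getD j 0 + 1
    let cur := st2.2.set (j + 1) k
    let best := if st2.1.1 < k then (k, (r : Int) - k + 1, (j : Int) - k + 1) else st2.1
    (best, cur)
  else st2

theorem pvCurOK_skip (a b : List Char) (r : Nat) (proc : List Nat) (cur : List Nat) (j : Nat)
    (hne : a.getD r ' ' ≠ b.getD j ' ') (h : pvCurOK a b r proc cur) :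
    pvCurOK a b r (proc ++ [j]) cur := by
  refine ⟨h.1, fun j' => ?_⟩
  rw [h.2 j']
  by_cases hj1 : 1 ≤ j'
  · by_cases hmem : (j' - 1) ∈ proc
    · simp [hj1, hmem]
    · by_cases hjj : j' - 1 = j
      · subst hjj
        simp [hj1, hmem, pvL_zero_of_ne a b r (j'-1) hne]
      · simp [hj1, hmem, hjj]
  · simp [hj1]

theorem pvCurOK_set (a b : List Char) (r : Nat) (proc : List Nat) (cur : List Nat) (j : Nat)
    (hj : j < b.length) (h : pvCurOK a b r proc cur) :
    pvCurOK a b r (proc ++ [j]) (cur.set (j + 1) (pvL a b r j)) := by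
  have hlen : j + 1 < cur.length := by rw [h.1]; omega
  refine ⟨by simpa using h.1, fun j' => ?_⟩
  have hget : (cur.set (j + 1) (pvL a b r j)).getD j' 0
      = if j + 1 = j' then pvL a b r j else cur.getD j' 0 := by
    simp only [List.getD_eq_getElem?_getD, List.getElem?_set]
    by_cases hjj : j + 1 = j'
    · simp [hjj, hjj ▸ hlen]
    · simp [hjj]
  rw [hget, h.2 j']
  by_cases hjj : j + 1 = j'
  · subst hjj; simp
  · rw [if_neg hjj]
    by_cases hj1 : 1 ≤ j'
    · have hne' : ¬ (j' - 1 = j) := by omega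
      simp [hj1, hne']
    · simp [hj1]

theorem pvInnerB_abs (a b : List Char) (r : Nat) (prev : List Nat)
    (hprev : pvRowOK a b r prev) :
    ∀ (L proc : List Nat) (bst : Nat × Int × Int) (cur : List Nat),
    (∀ j ∈ L, j < b.length) → pvCurOK a b r proc cur →
    ∃ cur', L.foldl (pvStepBRow a b r prev) (bst, cur)
        = (L.foldl (pvBUpd a b r) bst, cur') ∧ pvCurOK a b r (proc ++ L) cur'
  | [], proc, bst, cur, _, hcur => ⟨cur, rfl, by simpa using hcur⟩
  | j :: L, proc, bst, cur, hL, hcur => by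
    have hjm : j < b.length := hL j (by simp)
    by_cases hmatch : a.getD r ' ' = b.getD j ' '
    · have hk := pvReadB a b r j prev hjm hprev hmatch
      have hstep : pvStepBRow a b r prev (bst, cur) j
          = (pvBUpd a b r bst j, cur.set (j + 1) (pvL a b r j)) := by
        simp only [pvStepBRow, pvBUpd, if_pos hmatch, hk]
      obtain ⟨cur', heq, hok⟩ := pvInnerB_abs a b r prev hprev L (proc ++ [j])
        (pvBUpd a b r bst j) (cur.set (j + 1) (pvL a b r j))
        (fun x hx => hL x (by simp [hx]))
        (pvCurOK_set a b r proc cur j hjm hcur)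
      refine ⟨cur', ?_, ?_⟩
      · simpa [hstep] using heq
      · simpa [List.append_assoc] using hok
    · have hz : pvL a b r j = 0 := pvL_zero_of_ne a b r j hmatch
      have hstep : pvStepBRow a b r prev (bst, cur) j = (bst, cur) := by
        simp only [pvStepBRow, if_neg hmatch]
      have hb : pvBUpd a b r bst j = bst := by
        simp [pvBUpd, hz]
      obtain ⟨cur', heq, hok⟩ := pvInnerB_abs a b r prev hprev L (proc ++ [j]) bst cur
        (fun x hx => hL x (by simp [hx]))
        (pvCurOK_skip a b r proc cur j hmatch hcur)
      refine ⟨cur', ?_, ?_⟩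
      · simpa [hstep, hb] using heq
      · simpa [List.append_assoc] using hok

theorem pvRowOK_init (a b : List Char) : pvRowOK a b 0 (List.replicate (b.length + 1) 0) := by
  refine ⟨by simp, fun j => ?_⟩
  simp

theorem pvCurOK_init (a b : List Char) (r : Nat) :
    pvCurOK a b r [] (List.replicate (b.length + 1) 0) := by
  refine ⟨by simp, fun j => ?_⟩
  by_cases hj : j < b.length + 1
  · simp
  · simp [List.getD_eq_getElem?_getD, List.getElem?_eq_none (by simp; omega : (List.replicate (b.length+1) (0:Nat)).length ≤ j)]

theorem pvCurOK_to_RowOK (a b : List Char) (r : Nat) (cur : List Nat)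
    (h : pvCurOK a b r (List.range b.length) cur) : pvRowOK a b (r + 1) cur := by
  refine ⟨h.1, fun j => ?_⟩
  rw [h.2 j]
  have : (1 ≤ j ∧ (j - 1) ∈ List.range b.length) ↔ (1 ≤ j ∧ j ≤ b.length ∧ 1 ≤ r + 1) := by
    simp [List.mem_range]; omega
  simp only [List.mem_range]
  split_ifs with h1 h2 <;> first | rfl | (exfalso; simp [List.mem_range] at this ⊢; omega)

theorem pvOuterB (a b : List Char) (r : Nat) : ∃ prev,
    (List.range r).foldl
      (fun (st : (Nat × Int × Int) × List Nat) (i : Nat) =>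
        (List.range b.length).foldl (pvStepBRow a b i st.2) (st.1, List.replicate (b.length + 1) 0))
      ((0, 0, 0), List.replicate (b.length + 1) 0)
    = (pvBest a b r, prev) ∧ pvRowOK a b r prev := by
  induction r with
  | zero => exact ⟨_, rfl, pvRowOK_init a b⟩
  | succ r ih =>
    obtain ⟨prev, heq, hok⟩ := ih
    rw [List.range_succ, List.foldl_append, heq]
    obtain ⟨cur', heq', hok'⟩ := pvInnerB_abs a b r prev hok (List.range b.length) []
      (pvBest a b r) (List.replicate (b.length + 1) 0)
      (fun j hj => List.mem_range.mp hj) (pvCurOK_init a b r)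
    refine ⟨cur', ?_, pvCurOK_to_RowOK a b r cur' (by simpa using hok')⟩
    have hb : pvBest a b (r + 1) = (List.range b.length).foldl (pvBUpd a b r) (pvBest a b r) := by
      unfold pvBest
      rw [List.range_succ, List.foldl_append, List.foldl_cons, List.foldl_nil]
    rw [List.foldl_cons, List.foldl_nil, heq', hb]

theorem pvFlmB_eq (a b : List Char) : pvFlmB a b = pvCastB (pvBest a b a.length) := by
  obtain ⟨prev, heq, _⟩ := pvOuterB a b a.length
  have : pvFlmB a b = pvCastB ((List.range a.length).foldl
      (fun (st : (Nat × Int × Int) × List Nat) (i : Nat) =>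
        (List.range b.length).foldl (pvStepBRow a b i st.2) (st.1, List.replicate (b.length + 1) 0))
      ((0, 0, 0), List.replicate (b.length + 1) 0)).1 := rfl
  rw [this, heq]

-- ===== A side =====

-- the inner-loop body of pvInnerA on an in-range j, named for the proofs
def pvStepA (_b : List Char) (i : Int) (j2len : PySem.Dict Int Int)
    (st : (Int × Int × Int) × PySem.Dict Int Int) (j : Int) : (Int × Int × Int) × PySem.Dict Int Int :=
  let k := j2len.getD (j - 1) 0 + 1
  let newj2len := st.2.insert j k
  let best := if st.1.2.2 < k then (i - k + 1, j - k + 1, k) else st.1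
  (best, newj2len)

theorem pvInnerA_eq_foldl (b : List Char) (i : Int) (j2len : PySem.Dict Int Int) :
    ∀ (js : List Int) (st : (Int × Int × Int) × PySem.Dict Int Int),
    (∀ j ∈ js, 0 ≤ j ∧ j < (b.length : Int)) →
    pvInnerA b i j2len js st = js.foldl (pvStepA b i j2len) st
  | [], _, _ => rfl
  | j :: js, st, h => by
    have hj := h j (by simp)
    rw [pvInnerA, if_neg (by omega), if_neg (by omega), List.foldl_cons]
    exact pvInnerA_eq_foldl b i j2len js _ (fun x hx => h x (by simp [hx]))

theorem pvChain_getD (b : List Char) (c : Char) :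
    (pvChainB b).getD c [] =
      ((List.range b.length).filter (fun j => b.getD j ' ' == c)).map (fun j => ((j : Nat) : Int)) := by
  unfold pvChainB
  have h1 : (PySem.List.enumerate b 0).foldl
        (fun (d : PySem.Dict Char (List Int)) p => d.modify p.2 [] (· ++ [p.1])) PySem.Dict.empty
      = ((PySem.List.enumerate b 0).map Prod.swap).foldl
        (fun (d : PySem.Dict Char (List Int)) p => d.modify p.1 [] (· ++ [p.2])) PySem.Dict.empty := by
    rw [List.foldl_map]
    rfl
  rw [h1, PySem.Dict.getD_foldl_modify_append, PySem.Dict.getD_empty]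
  rw [PySem.List.enumerate_eq_map_pyRange b ' ', PySem.List.len_eq, PySem.List.pyRange_zero_natCast]
  simp [List.map_map, List.filter_map, Function.comp_def]

-- A's carried j2len dict (previous row), as read in row r
def pvDictOK (a b : List Char) (r : Nat) (d : PySem.Dict Int Int) : Prop :=
  ∀ j : Int, d.getD j 0 =
    if 0 ≤ j ∧ j < (b.length : Int) ∧ 1 ≤ r then ((pvL a b (r-1) j.toNat : Nat) : Int) else 0

theorem pvReadA (a b : List Char) (r j : Nat) (hj : j < b.length) (d : PySem.Dict Int Int)
    (hOK : pvDictOK a b r d) (hmatch : a.getD r ' ' = b.getD j ' ') :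
    d.getD ((j : Int) - 1) 0 + 1 = ((pvL a b r j : Nat) : Int) := by
  rw [pvL_match a b r j hmatch, hOK ((j : Int) - 1)]
  by_cases hr : 1 ≤ r <;> by_cases h0 : 1 ≤ j
  · rw [if_pos ⟨by omega, by omega, hr⟩, if_pos ⟨hr, h0⟩]
    have ht : ((j : Int) - 1).toNat = j - 1 := by omega
    rw [ht]; push_cast; ring
  · rw [if_neg (by omega), if_neg (by omega)]; simp
  · rw [if_neg (by omega), if_neg (by omega)]; simp
  · rw [if_neg (by omega), if_neg (by omega)]; simp

-- A's fresh newj2len dict after the matched columns in proc have been processed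
def pvNDOK (a b : List Char) (r : Nat) (proc : List Nat) (nd : PySem.Dict Int Int) : Prop :=
  ∀ j : Int, nd.getD j 0 =
    if 0 ≤ j ∧ j.toNat ∈ proc then ((pvL a b r j.toNat : Nat) : Int) else 0

theorem pvNDOK_insert (a b : List Char) (r : Nat) (proc : List Nat) (nd : PySem.Dict Int Int)
    (jn : Nat) (h : pvNDOK a b r proc nd) :
    pvNDOK a b r (proc ++ [jn]) (nd.insert ((jn : Nat) : Int) ((pvL a b r jn : Nat) : Int)) := by
  intro j
  rw [PySem.Dict.getD_insert, h j]
  by_cases hjj : j = ((jn : Nat) : Int)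
  · subst hjj; simp
  · rw [if_neg hjj]
    by_cases h0 : 0 ≤ j
    · have hne : j.toNat ≠ jn := by omega
      simp [h0, hne]
    · simp [h0]

theorem pvInnerA_abs (a b : List Char) (r : Nat) (d : PySem.Dict Int Int)
    (hd : pvDictOK a b r d) :
    ∀ (ML proc : List Nat) (bst : Nat × Int × Int) (nd : PySem.Dict Int Int),
    (∀ jn ∈ ML, jn < b.length ∧ a.getD r ' ' = b.getD jn ' ') →
    pvNDOK a b r proc nd →
    ∃ nd', ML.foldl (fun st jn => pvStepA b ((r : Nat) : Int) d st ((jn : Nat) : Int)) (pvCastA bst, nd)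
        = (pvCastA (ML.foldl (pvBUpd a b r) bst), nd') ∧ pvNDOK a b r (proc ++ ML) nd'
  | [], proc, bst, nd, _, hnd => ⟨nd, rfl, by simpa using hnd⟩
  | jn :: ML, proc, bst, nd, hML, hnd => by
    obtain ⟨hjm, hmatch⟩ := hML jn (by simp)
    have hk := pvReadA a b r jn hjm d hd hmatch
    have hstep : pvStepA b ((r : Nat) : Int) d (pvCastA bst, nd) ((jn : Nat) : Int)
        = (pvCastA (pvBUpd a b r bst jn), nd.insert ((jn : Nat) : Int) ((pvL a b r jn : Nat) : Int)) := by
      simp only [pvStepA, pvBUpd, pvCastA, hk]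
      by_cases hlt : bst.1 < pvL a b r jn
      · rw [if_pos (by exact_mod_cast hlt), if_pos hlt]
      · rw [if_neg (by exact_mod_cast hlt), if_neg hlt]
    obtain ⟨nd', heq, hok⟩ := pvInnerA_abs a b r d hd ML (proc ++ [jn])
      (pvBUpd a b r bst jn) (nd.insert ((jn : Nat) : Int) ((pvL a b r jn : Nat) : Int))
      (fun x hx => hML x (by simp [hx]))
      (pvNDOK_insert a b r proc nd jn hnd)
    refine ⟨nd', ?_, ?_⟩
    · simpa [hstep] using heq
    · simpa [List.append_assoc] using hok

theorem pvNDOK_to_DictOK (a b : List Char) (r : Nat) (nd : PySem.Dict Int Int)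
    (h : pvNDOK a b r ((List.range b.length).filter
          (fun j => b.getD j ' ' == a.getD r ' ')) nd) :
    pvDictOK a b (r+1) nd := by
  intro j
  rw [h j]
  by_cases h0 : 0 ≤ j
  · by_cases hm : j < (b.length : Int)
    · by_cases hc : (b.getD j.toNat ' ' == a.getD r ' ') = true
      · have hmem : j.toNat ∈ (List.range b.length).filter (fun j => b.getD j ' ' == a.getD r ' ') := by
          rw [List.mem_filter]
          exact ⟨List.mem_range.mpr (by omega), hc⟩
        rw [if_pos ⟨h0, hmem⟩, if_pos ⟨h0, hm, by omega⟩]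
        simp
      · have hmem : j.toNat ∉ (List.range b.length).filter (fun j => b.getD j ' ' == a.getD r ' ') :=
          fun hmem' => hc (List.mem_filter.mp hmem').2
        rw [if_neg (fun hh => hmem hh.2), if_pos ⟨h0, hm, by omega⟩]
        have hz : pvL a b r j.toNat = 0 := by
          apply pvL_zero_of_ne
          intro hEq
          apply hc
          rw [beq_iff_eq]
          exact hEq.symm
        simp [hz]
    · have hmem : j.toNat ∉ (List.range b.length).filter (fun j => b.getD j ' ' == a.getD r ' ') :=
        fun hmem' => by
          have := List.mem_range.mp (List.mem_filter.mp hmem').1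
          omega
      rw [if_neg (fun hh => hmem hh.2), if_neg (fun hh => hm hh.2.1)]
  · rw [if_neg (fun hh => h0 hh.1), if_neg (fun hh => h0 hh.1)]

theorem pvFold_filter (a b : List Char) (r : Nat) (bst : Nat × Int × Int) :
    ((List.range b.length).filter (fun j => b.getD j ' ' == a.getD r ' ')).foldl
        (pvBUpd a b r) bst
      = (List.range b.length).foldl (pvBUpd a b r) bst := by
  rw [List.foldl_filter]
  apply PySem.List.foldl_congr_mem
  intro acc x _
  by_cases hm : b.getD x ' ' == a.getD r ' '
  · rw [if_pos hm]
  · rw [if_neg hm]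
    have hz : pvL a b r x = 0 := by
      apply pvL_zero_of_ne
      intro hEq
      apply hm
      rw [beq_iff_eq]
      exact hEq.symm
    simp [pvBUpd, hz]

theorem pvRowA_abs (a b : List Char) (r : Nat) (bst : Nat × Int × Int) (d : PySem.Dict Int Int)
    (hd : pvDictOK a b r d) :
    ∃ d', pvRowA a b (pvChainB b) (pvCastA bst, d) ((r : Nat) : Int)
        = (pvCastA ((List.range b.length).foldl (pvBUpd a b r) bst), d') ∧ pvDictOK a b (r+1) d' := by
  have hmem : ∀ j ∈ ((List.range b.length).filter (fun j => b.getD j ' ' == a.getD r ' ')).map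
      (fun j => ((j : Nat) : Int)), 0 ≤ j ∧ j < (b.length : Int) := by
    intro j hj
    obtain ⟨x, hx, rfl⟩ := List.mem_map.mp hj
    have := List.mem_range.mp (List.mem_filter.mp hx).1
    constructor <;> omega
  have hmem2 : ∀ jn ∈ (List.range b.length).filter (fun j => b.getD j ' ' == a.getD r ' '),
      jn < b.length ∧ a.getD r ' ' = b.getD jn ' ' := by
    intro jn hjn
    have h1 := List.mem_filter.mp hjn
    exact ⟨List.mem_range.mp h1.1, (beq_iff_eq.mp h1.2).symm⟩
  have hnd0 : pvNDOK a b r [] PySem.Dict.empty := by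
    intro j; simp [PySem.Dict.getD_empty]
  obtain ⟨nd', heq, hok⟩ := pvInnerA_abs a b r d hd
    ((List.range b.length).filter (fun j => b.getD j ' ' == a.getD r ' ')) []
    bst PySem.Dict.empty hmem2 hnd0
  refine ⟨nd', ?_, pvNDOK_to_DictOK a b r nd' (by simpa using hok)⟩
  unfold pvRowA
  rw [PySem.List.pyGetD_natCast, pvChain_getD,
    pvInnerA_eq_foldl b ((r : Nat) : Int) d _ _ hmem, List.foldl_map, heq, pvFold_filter]

theorem pvOuterA (a b : List Char) (r : Nat) : ∃ d,
    (List.range r).foldl (fun st i => pvRowA a b (pvChainB b) st ((i : Nat) : Int))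
        ((0, 0, 0), PySem.Dict.empty)
      = (pvCastA (pvBest a b r), d) ∧ pvDictOK a b r d := by
  induction r with
  | zero =>
    refine ⟨PySem.Dict.empty, rfl, ?_⟩
    intro j; simp [PySem.Dict.getD_empty]
  | succ r ih =>
    obtain ⟨d, heq, hok⟩ := ih
    rw [List.range_succ, List.foldl_append, heq]
    obtain ⟨d', heq', hok'⟩ := pvRowA_abs a b r (pvBest a b r) d hok
    have hb : pvBest a b (r + 1) = (List.range b.length).foldl (pvBUpd a b r) (pvBest a b r) := by
      unfold pvBest
      rw [List.range_succ, List.foldl_append, List.foldl_cons, List.foldl_nil]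
    refine ⟨d', ?_, hok'⟩
    rw [List.foldl_cons, List.foldl_nil, heq', hb]

theorem pvExt1_noop (a b : List Char) (best : Nat × Int × Int)
    (h : pvBestOK a b a.length 0 best) :
    ∀ fuel, pvExt1 a b fuel (pvCastA best) = pvCastA best := by
  intro fuel
  cases fuel with
  | zero => rfl
  | succ fuel =>
    show pvExt1 a b (fuel + 1) (best.2.1, best.2.2, (best.1 : Int)) = _
    rw [pvExt1, if_neg]
    rfl
    rintro ⟨h1, h2, -, h4⟩
    by_cases hs : best.1 = 0
    · have h000 := h.2.1 hs
      rw [h000] at h1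
      exact absurd h1 (by norm_num)
    · obtain ⟨ie, je, hje, -, hLs, hbi, hbj⟩ := h.2.2 (by omega)
      rw [hbi] at h1
      rw [hbj] at h2
      have hsle1 : best.1 ≤ ie := by omega
      have hsle2 : best.1 ≤ je := by omega
      have e1 : best.2.1 - 1 = ((ie - best.1 : Nat) : Int) := by rw [hbi]; omega
      have e2 : best.2.2 - 1 = ((je - best.1 : Nat) : Int) := by rw [hbj]; omega
      rw [e1, e2, PySem.List.pyGetD_natCast, PySem.List.pyGetD_natCast] at h4
      exact pvL_block a b ie je best.1 hLs hsle1 hsle2 h4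

theorem pvExt2_noop (a b : List Char) (best : Nat × Int × Int)
    (h : pvBestOK a b a.length 0 best) :
    ∀ fuel, pvExt2 a b fuel (pvCastA best) = pvCastA best := by
  intro fuel
  cases fuel with
  | zero => rfl
  | succ fuel =>
    show pvExt2 a b (fuel + 1) (best.2.1, best.2.2, (best.1 : Int)) = _
    rw [pvExt2, if_neg]
    rfl
    rintro ⟨h1, h2, -, h4⟩
    by_cases hs : best.1 = 0
    · have h000 := h.2.1 hs
      rw [h000] at h1 h2 h4
      norm_num at h1 h2 h4
      have hn : 0 < a.length := by exact_mod_cast h1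
      have hm : 0 < b.length := by exact_mod_cast h2
      rw [PySem.List.pyGetD_zero, PySem.List.pyGetD_zero] at h4
      have hp : 0 < pvL a b 0 0 := by rw [pvL_match a b 0 0 h4]; omega
      have := h.1 0 0 hm (Or.inl (by omega))
      omega
    · obtain ⟨ie, je, hje, hcase, hLs, hbi, hbj⟩ := h.2.2 (by omega)
      have hsle1 : best.1 ≤ ie + 1 := by
        have := pvL_le_left a b ie je; omega
      have e1 : best.2.1 + (best.1 : Int) = ((ie + 1 : Nat) : Int) := by rw [hbi]; push_cast; ring
      have e2 : best.2.2 + (best.1 : Int) = ((je + 1 : Nat) : Int) := by rw [hbj]; push_cast; ring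
      rw [e1, e2, PySem.List.pyGetD_natCast, PySem.List.pyGetD_natCast] at h4
      rw [e1] at h1
      rw [e2] at h2
      have hn : ie + 1 < a.length := by exact_mod_cast h1
      have hm : je + 1 < b.length := by exact_mod_cast h2
      have hstep := pvL_succ_eq a b ie je h4
      have := h.1 (ie + 1) (je + 1) hm (Or.inl hn)
      omega

theorem pvExt3_noop (a b : List Char) (best : Int × Int × Int) :
    ∀ fuel, pvExt3 a b fuel best = best := by
  intro fuel
  cases fuel with
  | zero => rfl
  | succ fuel =>
    obtain ⟨bi, bj, bs⟩ := best
    rw [pvExt3, if_neg]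
    rintro ⟨-, -, hj, -⟩
    simp at hj

theorem pvExt4_noop (a b : List Char) (best : Int × Int × Int) :
    ∀ fuel, pvExt4 a b fuel best = best := by
  intro fuel
  cases fuel with
  | zero => rfl
  | succ fuel =>
    obtain ⟨bi, bj, bs⟩ := best
    rw [pvExt4, if_neg]
    rintro ⟨-, -, hj, -⟩
    simp at hj

theorem pvFlmA_eq (a b : List Char) : pvFlmA a b = pvCastA (pvBest a b a.length) := by
  obtain ⟨d, heq, -⟩ := pvOuterA a b a.length
  have h0 := pvBestOK_final a b
  show pvExt4 a b (a.length + b.length + 1)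
      (pvExt3 a b (a.length + b.length + 1)
        (pvExt2 a b (a.length + b.length + 1)
          (pvExt1 a b (a.length + b.length + 1)
            ((PySem.List.pyRange 0 (a.length : Int) 1).foldl (pvRowA a b (pvChainB b))
              ((0, 0, 0), PySem.Dict.empty)).1)))
    = pvCastA (pvBest a b a.length)
  rw [PySem.List.pyRange_zero_natCast, List.foldl_map, heq]
  show pvExt4 a b (a.length + b.length + 1)
      (pvExt3 a b (a.length + b.length + 1)
        (pvExt2 a b (a.length + b.length + 1)
          (pvExt1 a b (a.length + b.length + 1) (pvCastA (pvBest a b a.length)))))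
    = pvCastA (pvBest a b a.length)
  rw [pvExt1_noop a b _ h0, pvExt2_noop a b _ h0, pvExt3_noop, pvExt4_noop]

theorem pvSlice_zero (xs : List Char) : PySem.List.slice xs none (some 0) = [] := by
  simp [PySem.List.slice]

theorem pvSubRemove_nil (s : List Char) : pvSubRemove s [] = s := by
  simp [pvSubRemove]

theorem pvGo_eq : ∀ (fuel : Nat) (start : Int) (ref var : List Char),
    pvRmsAgo fuel start ref var = pvRmsBgo fuel start ref var := by
  intro fuel
  induction fuel with
  | zero => intro _ _ _; rfl
  | succ fuel ih =>
    intro start ref var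
    simp only [pvRmsAgo, pvRmsBgo, pvFlmA_eq, pvFlmB_eq]
    have hOK := pvBestOK_final ref var
    by_cases hs : (pvBest ref var ref.length).1 = 0
    · have h000 : pvBest ref var ref.length = (0, 0, 0) := hOK.2.1 hs
      rw [h000]
      simp only [pvCastA, pvCastB]
      simp [pvSlice_zero, pvSubRemove_nil]
    · have hms : (((pvBest ref var ref.length).1 : Nat) : Int) ≠ 0 := by exact_mod_cast hs
      simp only [pvCastA, pvCastB, if_neg hms]
      simp only [decide_eq_true_eq]
      exact ih _ _ _

-- ===== VERDICT (by name: the statement is the Claim_ definition above) =====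
theorem remove_matching_string_spec : Claim_equal_remove_matching_string := by
  intro start ref var _
  unfold Spec_remove_matching_string remove_matching_string remove_matching_string_alt
  rw [pvGo_eq]
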